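-- pv_equiv track=rewrite | github.com/Amanda-dong/CS473-FML | src/data/download_census.py | assess_columns
-- ===== SOURCE A (Python) =====
-- def assess_columns(columns: list[str]) -> tuple[bool, bool, bool]:
--     lower_map = {column.lower(): column for column in columns}
--     has_identifier = any(key in lower_map for key in ("geoid", "geogname", "ntatype"))
--     has_median_income = any("mdhhinc" in column.lower() for column in columns)
--     has_population = any(
--         token in column.lower()
--         for token in ("pop_1e", "population", "pop16ple")
--         for column in columns
--     )
--     return has_identifier, has_median_income, has_population
-- ===== SOURCE B (Python) =====
-- def assess_columns(columns: list[str]) -> tuple[bool, bool, bool]: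
--     has_identifier = False
--     has_median_income = False
--     has_population = False
--     for column in columns:
--         lc = column.lower()
--         if lc in ("geoid", "geogname", "ntatype"):
--             has_identifier = True
--         if "mdhhinc" in lc:
--             has_median_income = True
--         if "pop_1e" in lc or "population" in lc or "pop16ple" in lc:
--             has_population = True
--     return has_identifier, has_median_income, has_population
-- ===== Notes on version B (the rewrite author's own statement) =====
-- stated objective: simpler
-- what changed: Replaces the dict build plus three separate any() scans (one quadratic in tokens x columns) with a single pass over columns that lowercases each name once and updates three boolean flags.
import Mathlib
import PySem

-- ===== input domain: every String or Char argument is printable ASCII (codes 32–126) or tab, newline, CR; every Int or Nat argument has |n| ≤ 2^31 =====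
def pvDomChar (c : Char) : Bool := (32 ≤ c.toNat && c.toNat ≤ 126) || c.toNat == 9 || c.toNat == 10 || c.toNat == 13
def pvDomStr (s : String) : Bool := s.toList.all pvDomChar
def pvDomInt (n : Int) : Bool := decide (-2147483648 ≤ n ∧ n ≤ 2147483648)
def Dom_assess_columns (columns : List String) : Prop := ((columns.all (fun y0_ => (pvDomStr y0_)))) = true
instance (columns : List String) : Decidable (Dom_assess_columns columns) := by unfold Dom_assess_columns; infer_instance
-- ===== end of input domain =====

-- B replaces A's dict build plus three separate any() scans by a single pass over the
-- columns that lowercases each name once and updates three boolean flags (simpler).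

-- ===== PORT A =====
def assess_columns (columns : List String) : Bool × Bool × Bool :=
  let lower_map : PySem.Dict String String :=
    columns.foldl (fun d c => d.insert (PySem.Str.lower c) c) PySem.Dict.empty
  let has_identifier := (["geoid", "geogname", "ntatype"]).any (fun key => lower_map.contains key)
  let has_median_income := columns.any (fun c => PySem.Str.isIn "mdhhinc" (PySem.Str.lower c))
  let has_population := (["pop_1e", "population", "pop16ple"]).any
    (fun token => columns.any (fun c => PySem.Str.isIn token (PySem.Str.lower c)))
  (has_identifier, has_median_income, has_population)

-- ===== PORT B =====
def assess_columns_alt (columns : List String) : Bool × Bool × Bool :=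
  columns.foldl
    (fun acc c =>
      let lc := PySem.Str.lower c
      let hid := if lc == "geoid" || lc == "geogname" || lc == "ntatype" then true else acc.1
      let hmi := if PySem.Str.isIn "mdhhinc" lc then true else acc.2.1
      let hpo := if PySem.Str.isIn "pop_1e" lc || PySem.Str.isIn "population" lc ||
                    PySem.Str.isIn "pop16ple" lc then true else acc.2.2
      (hid, hmi, hpo))
    (false, false, false)

-- ===== PRECONDITION & SPEC =====
def Spec_assess_columns (columns : List String) (out : Bool × Bool × Bool) : Prop := out = assess_columns_alt columns
instance (columns : List String) (out : Bool × Bool × Bool) : Decidable (Spec_assess_columns columns out) := by unfold Spec_assess_columns; infer_instance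

-- ===== CLAIM (what is proved, stated in full; the proofs are below) =====
def Claim_equal_assess_columns : Prop := ∀ (columns : List String), Dom_assess_columns columns → Spec_assess_columns columns (assess_columns columns)

-- ===== LEMMAS AND PROOFS =====

-- A Bool `if` that sets a flag is a disjunction.
theorem if_or (c v : Bool) : (if c = true then true else v) = (c || v) := by cases c <;> simp

-- `any` distributes over a pointwise disjunction.
theorem any_or_any {α : Type} (l : List α) (f g : α → Bool) :
    l.any (fun x => f x || g x) = (l.any f || l.any g) := by
  induction l with
  | nil => simp
  | cons x xs ih => simp [ih, Bool.or_assoc, Bool.or_left_comm]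

-- B's single fold computes the three pointwise `any`s (generalized over the accumulator).
theorem alt_foldl_any (columns : List String) (a b c : Bool) :
    columns.foldl
      (fun acc c =>
        (PySem.Str.lower c == "geoid" || PySem.Str.lower c == "geogname" ||
           PySem.Str.lower c == "ntatype" || acc.1,
         PySem.Str.isIn "mdhhinc" (PySem.Str.lower c) || acc.2.1,
         PySem.Str.isIn "pop_1e" (PySem.Str.lower c) || PySem.Str.isIn "population" (PySem.Str.lower c) ||
           PySem.Str.isIn "pop16ple" (PySem.Str.lower c) || acc.2.2))
      (a, b, c) =
    (a || columns.any (fun s => PySem.Str.lower s == "geoid" || PySem.Str.lower s == "geogname" ||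
            PySem.Str.lower s == "ntatype"),
     b || columns.any (fun s => PySem.Str.isIn "mdhhinc" (PySem.Str.lower s)),
     c || columns.any (fun s => PySem.Str.isIn "pop_1e" (PySem.Str.lower s) ||
            PySem.Str.isIn "population" (PySem.Str.lower s) ||
            PySem.Str.isIn "pop16ple" (PySem.Str.lower s))) := by
  induction columns generalizing a b c with
  | nil => simp
  | cons x xs ih =>
    simp only [List.foldl_cons, List.any_cons]
    rw [ih]
    refine congrArg₂ Prod.mk ?_ (congrArg₂ Prod.mk ?_ ?_) <;> ac_rfl

-- A's dict-key membership is an `any` over the lowercased columns.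
theorem contains_lower_map (columns : List String) (key : String) :
    (columns.foldl (fun d c => d.insert (PySem.Str.lower c) c)
        (PySem.Dict.empty : PySem.Dict String String)).contains key =
      columns.any (fun s => PySem.Str.lower s == key) := by
  rw [PySem.Dict.contains_eq_decide_mem_keys, PySem.Dict.keys_foldl_insert_key,
    PySem.Dict.keys_empty, PySem.Set.update_nil_left]
  rw [Bool.eq_iff_iff]
  simp only [decide_eq_true_eq, PySem.Set.mem_ofList, List.mem_map, List.any_eq_true, beq_iff_eq]

-- ===== VERDICT (by name: the statement is the Claim_ definition above) =====
theorem assess_columns_spec : Claim_equal_assess_columns := by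
  intro columns _
  unfold Spec_assess_columns assess_columns assess_columns_alt
  simp only [if_or]
  rw [alt_foldl_any]
  simp only [List.any_cons, List.any_nil, contains_lower_map, Bool.or_false, Bool.false_or]
  refine congrArg₂ Prod.mk ?_ (congrArg₂ Prod.mk rfl ?_)
  · simp only [any_or_any, Bool.or_assoc]
  · simp only [any_or_any, Bool.or_assoc]
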